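-- pv_equiv track=rewrite | github.com/Tfo0/VueScan | src/vue_chunk/request_locator.py | _fallback_file_order
-- ===== SOURCE A (Python) =====
-- def _fallback_file_order(files: list[str]) -> list[str]:
--     keywords = ("app", "main", "vendor", "chunk-vendors", "index")
--     return sorted(
--         files,
--         key=lambda name: (
--             0 if any(token in name.lower() for token in keywords) else 1,
--             name.lower(),
--         ),
--     )
-- ===== SOURCE B (Python) =====
-- def _fallback_file_order(files: list[str]) -> list[str]:
--     keywords = ("app", "main", "vendor", "chunk-vendors", "index")
--     priority = []
--     rest = []
--     for name in files:
--         low = name.lower()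
--         if any(token in low for token in keywords):
--             priority.append(name)
--         else:
--             rest.append(name)
--     return sorted(priority, key=str.lower) + sorted(rest, key=str.lower)
-- ===== Notes on version B (the rewrite author's own statement) =====
-- stated objective: alternative
-- what changed: Replaces the single sort with a composite (flag, lowercase) tuple key by an explicit one-pass partition into priority/rest followed by two independent lowercase-keyed sorts concatenated.
import Mathlib
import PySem

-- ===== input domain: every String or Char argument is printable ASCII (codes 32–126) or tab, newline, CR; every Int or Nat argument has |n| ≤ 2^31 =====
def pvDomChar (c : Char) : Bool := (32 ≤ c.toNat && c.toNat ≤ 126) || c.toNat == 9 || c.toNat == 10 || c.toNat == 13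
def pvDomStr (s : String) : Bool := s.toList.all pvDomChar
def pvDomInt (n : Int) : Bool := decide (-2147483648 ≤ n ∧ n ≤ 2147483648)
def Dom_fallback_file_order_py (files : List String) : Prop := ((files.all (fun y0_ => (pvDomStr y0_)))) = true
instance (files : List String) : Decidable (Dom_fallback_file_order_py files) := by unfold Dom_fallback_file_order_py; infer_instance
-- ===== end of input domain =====

-- B partitions the files into priority/rest in one pass and concatenates two independent
-- lowercase-keyed sorts, instead of A's single sort with a composite (flag, lowercase) key.

-- ===== PORT A =====
def pvKeywords : List String := ["app", "main", "vendor", "chunk-vendors", "index"]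

def fallback_file_order_py (files : List String) : List String :=
  PySem.List.sorted2 files
    (fun name => if pvKeywords.any (fun token => PySem.Str.isIn token (PySem.Str.lower name)) then (0 : Int) else 1)
    (fun name => PySem.Str.lower name)

-- ===== PORT B =====
def pvFlag (name : String) : Bool :=
  pvKeywords.any (fun token => PySem.Str.isIn token (PySem.Str.lower name))

def fallback_file_order_py_alt (files : List String) : List String :=
  let pr : List String × List String :=
    files.foldl (fun acc name =>
      if pvFlag name then (acc.1 ++ [name], acc.2) else (acc.1, acc.2 ++ [name])) ([], [])
  PySem.List.sorted pr.1 (fun n => PySem.Str.lower n)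
    ++ PySem.List.sorted pr.2 (fun n => PySem.Str.lower n)

-- ===== PRECONDITION & SPEC =====
def Spec_fallback_file_order_py (files : List String) (out : List String) : Prop := out = fallback_file_order_py_alt files
instance (files : List String) (out : List String) : Decidable (Spec_fallback_file_order_py files out) := by unfold Spec_fallback_file_order_py; infer_instance

-- ===== CLAIM (what is proved, stated in full; the proofs are below) =====
def Claim_equal_fallback_file_order_py : Prop := ∀ (files : List String), Dom_fallback_file_order_py files → Spec_fallback_file_order_py files (fallback_file_order_py files)

-- ===== LEMMAS AND PROOFS =====

-- A's composite comparison and the integer first key induced by the flag.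
def pvK1 (name : String) : Int := if pvFlag name then 0 else 1

def pvLt2 (a b : String) : Bool :=
  decide (pvK1 a < pvK1 b) || (!decide (pvK1 b < pvK1 a) && decide (PySem.Str.lower a < PySem.Str.lower b))

def pvLtL (a b : String) : Bool := decide (PySem.Str.lower a < PySem.Str.lower b)

theorem pvLt2_eq_ltL {a b : String} (h : pvFlag a = pvFlag b) : pvLt2 a b = pvLtL a b := by
  unfold pvLt2 pvLtL pvK1
  rw [h]; cases pvFlag b <;> simp

theorem pvLt2_true {a b : String} (ha : pvFlag a = true) (hb : pvFlag b = false) : pvLt2 a b = true := by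
  simp [pvLt2, pvK1, ha, hb]

theorem pvLt2_false {a b : String} (ha : pvFlag a = false) (hb : pvFlag b = true) : pvLt2 a b = false := by
  simp [pvLt2, pvK1, ha, hb]

-- inserting a flagged element into (flagged prefix ++ unflagged suffix) stays in the prefix
theorem insertBy_flag (x : String) (P R : List String) (hx : pvFlag x = true)
    (hP : ∀ p ∈ P, pvFlag p = true) (hR : ∀ r ∈ R, pvFlag r = false) :
    PySem.List.insertBy pvLt2 x (P ++ R) = PySem.List.insertBy pvLtL x P ++ R := by
  induction P with
  | nil =>
    cases R with
    | nil => simp [PySem.List.insertBy]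
    | cons r R' =>
      simp only [List.nil_append, PySem.List.insertBy]
      rw [pvLt2_true hx (hR r (by simp))]
      simp
  | cons p P' ih =>
    have hp := hP p (by simp)
    simp only [List.cons_append, PySem.List.insertBy]
    rw [pvLt2_eq_ltL (hx.trans hp.symm)]
    cases h : pvLtL x p with
    | true => simp
    | false => simp [ih (fun q hq => hP q (by simp [hq]))]

-- inserting an unflagged element into (flagged prefix ++ unflagged suffix) stays in the suffix
theorem insertBy_noflag (x : String) (P R : List String) (hx : pvFlag x = false)
    (hP : ∀ p ∈ P, pvFlag p = true) (hR : ∀ r ∈ R, pvFlag r = false) :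
    PySem.List.insertBy pvLt2 x (P ++ R) = P ++ PySem.List.insertBy pvLtL x R := by
  induction P with
  | nil =>
    simp only [List.nil_append]
    induction R with
    | nil => simp [PySem.List.insertBy]
    | cons r R' ihr =>
      have hr := hR r (by simp)
      simp only [PySem.List.insertBy]
      rw [pvLt2_eq_ltL (hx.trans hr.symm)]
      cases h : pvLtL x r with
      | true => simp
      | false => simp [ihr (fun q hq => hR q (by simp [hq]))]
  | cons p P' ih =>
    simp only [List.cons_append, PySem.List.insertBy]
    rw [pvLt2_false hx (hP p (by simp))]
    simp [ih (fun q hq => hP q (by simp [hq]))]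

theorem mem_insertBy_flag {x y : String} {ys : List String}
    (h : y ∈ PySem.List.insertBy pvLtL x ys) : y = x ∨ y ∈ ys := by
  exact (PySem.List.mem_insertBy _ _ _ _).1 h

-- main invariant: A's insertion sort over the composite order, started from a
-- (flagged ++ unflagged) accumulator, splits into two independent insertion sorts
theorem foldl_split (xs : List String) (P R : List String)
    (hP : ∀ p ∈ P, pvFlag p = true) (hR : ∀ r ∈ R, pvFlag r = false) :
    xs.foldl (fun acc x => PySem.List.insertBy pvLt2 x acc) (P ++ R)
      = (xs.filter pvFlag).foldl (fun acc x => PySem.List.insertBy pvLtL x acc) P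
        ++ (xs.filter (fun x => !pvFlag x)).foldl (fun acc x => PySem.List.insertBy pvLtL x acc) R := by
  induction xs generalizing P R with
  | nil => simp
  | cons x xs ih =>
    simp only [List.foldl_cons, List.filter_cons]
    cases hx : pvFlag x with
    | true =>
      rw [insertBy_flag x P R hx hP hR]
      simp only [Bool.not_true, if_true, Bool.false_eq_true, if_false]
      have : ∀ p ∈ PySem.List.insertBy pvLtL x P, pvFlag p = true := by
        intro p hp
        rcases mem_insertBy_flag hp with h | h
        · rw [h]; exact hx
        · exact hP p h
      simpa using ih (PySem.List.insertBy pvLtL x P) R this hR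
    | false =>
      rw [insertBy_noflag x P R hx hP hR]
      simp only [Bool.not_false, if_true, Bool.false_eq_true, if_false]
      have : ∀ r ∈ PySem.List.insertBy pvLtL x R, pvFlag r = false := by
        intro r hr
        rcases mem_insertBy_flag hr with h | h
        · rw [h]; exact hx
        · exact hR r h
      simpa using ih P (PySem.List.insertBy pvLtL x R) hP this

-- B's partition pair is (filter pvFlag, filter (!pvFlag))
theorem partition_foldl (xs : List String) (a b : List String) :
    xs.foldl (fun acc name =>
        if pvFlag name then (acc.1 ++ [name], acc.2) else (acc.1, acc.2 ++ [name])) (a, b)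
      = (a ++ xs.filter pvFlag, b ++ xs.filter (fun x => !pvFlag x)) := by
  induction xs generalizing a b with
  | nil => simp
  | cons x xs ih =>
    simp only [List.foldl_cons, List.filter_cons]
    cases hx : pvFlag x with
    | true => simp [ih]
    | false => simp [ih]

-- A's sorted2 literally is the foldl of insertBy with pvLt2
theorem portA_unfold (files : List String) :
    fallback_file_order_py files
      = files.foldl (fun acc x => PySem.List.insertBy pvLt2 x acc) [] := by
  rfl

-- ===== VERDICT (by name: the statement is the Claim_ definition above) =====
theorem fallback_file_order_py_spec : Claim_equal_fallback_file_order_py := by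
  intro files _
  show fallback_file_order_py files = fallback_file_order_py_alt files
  rw [portA_unfold]
  have h := foldl_split files [] [] (by simp) (by simp)
  simp only [List.nil_append] at h
  rw [h]
  unfold fallback_file_order_py_alt
  rw [partition_foldl]
  show _ = PySem.List.sorted ([] ++ List.filter pvFlag files) (fun n => PySem.Str.lower n)
      ++ PySem.List.sorted ([] ++ List.filter (fun x => !pvFlag x) files) (fun n => PySem.Str.lower n)
  rw [PySem.List.sorted_eq_foldl_insertBy, PySem.List.sorted_eq_foldl_insertBy]
  rfl
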